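-- pv_equiv track=rewrite | github.com/sotech117/basic-ultrasonic-linklayer | utils.py | frequencies_to_bits
-- ===== SOURCE A (Python) =====
-- def frequencies_to_bits(frequencies, expected_freqs):
--     # get the interval between frequencies, so we can clamp the range around them
--     freq_interval = expected_freqs[1] - expected_freqs[0]
--     plus_minus = freq_interval // 2
--
--     bit_list = ['0'] * len(expected_freqs)
--     for freq in frequencies:
--         for i in range(len(expected_freqs)):
--             # clamp the range around the frequency to the frequency
--             if expected_freqs[i] - plus_minus <= freq < expected_freqs[i] + plus_minus:
--                 bit_list[i] = '1'
--
--     return bit_list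
-- ===== SOURCE B (Python) =====
-- def frequencies_to_bits(frequencies, expected_freqs):
--     # One '0'/'1' per band: bit i is '1' iff some frequency lies in
--     # [expected_freqs[i] - half, expected_freqs[i] + half).
--     # Sort the frequencies once, then answer each band with two binary
--     # searches instead of scanning all frequencies per band.
--     half = (expected_freqs[1] - expected_freqs[0]) // 2
--     fs = sorted(frequencies)
--
--     def bisect_left(a, x):
--         lo, hi = 0, len(a)
--         while lo < hi:
--             mid = (lo + hi) // 2
--             if a[mid] < x:
--                 lo = mid + 1
--             else:
--                 hi = mid
--         return lo
--
--     return ['1' if bisect_left(fs, e - half) < bisect_left(fs, e + half) else '0'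
--             for e in expected_freqs]
-- ===== Notes on version B (the rewrite author's own statement) =====
-- stated objective: faster
-- what changed: Replaces the nested scan (every frequency against every band) by sorting the frequencies once and answering each band with two binary searches for the band's interval endpoints.
import Mathlib
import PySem

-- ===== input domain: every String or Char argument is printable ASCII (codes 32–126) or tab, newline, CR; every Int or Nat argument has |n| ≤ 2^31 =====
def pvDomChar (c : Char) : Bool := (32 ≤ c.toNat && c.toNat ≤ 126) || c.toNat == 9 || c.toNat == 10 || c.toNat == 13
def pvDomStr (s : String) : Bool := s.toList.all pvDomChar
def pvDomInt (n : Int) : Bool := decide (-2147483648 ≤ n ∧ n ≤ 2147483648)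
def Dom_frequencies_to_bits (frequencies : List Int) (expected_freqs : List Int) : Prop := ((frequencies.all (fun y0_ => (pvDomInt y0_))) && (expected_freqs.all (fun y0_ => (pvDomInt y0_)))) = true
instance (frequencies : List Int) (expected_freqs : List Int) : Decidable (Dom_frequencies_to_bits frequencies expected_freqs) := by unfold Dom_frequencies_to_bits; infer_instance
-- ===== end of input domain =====

-- B sorts the frequencies once and answers each band with two binary searches
-- (objective: faster, O((F+E) log F) instead of A's nested O(F*E) scan).

-- ===== PORT A =====
-- literal transliteration of A: nested loops, mutating bit_list in place (List.set)
def frequencies_to_bits (frequencies : List Int) (expected_freqs : List Int) : List String :=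
  let freq_interval := expected_freqs.getD 1 0 - expected_freqs.getD 0 0
  let plus_minus := PySem.Int.floordiv freq_interval 2
  let bit_list := List.replicate expected_freqs.length "0"
  frequencies.foldl (fun bl freq =>
    (List.range expected_freqs.length).foldl (fun bl i =>
      if expected_freqs.getD i 0 - plus_minus ≤ freq ∧ freq < expected_freqs.getD i 0 + plus_minus
      then bl.set i "1" else bl) bl) bit_list

-- ===== PORT B =====
-- Source B's hand-written bisect_left is the standard lo/hi halving loop, which is
-- exactly PySem.List.bisectLeft (same loop, same state).
def frequencies_to_bits_alt (frequencies : List Int) (expected_freqs : List Int) : List String :=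
  let half := PySem.Int.floordiv (expected_freqs.getD 1 0 - expected_freqs.getD 0 0) 2
  let fs := PySem.List.sorted frequencies (fun x => x) false
  expected_freqs.map (fun e =>
    if PySem.List.bisectLeft fs (e - half) < PySem.List.bisectLeft fs (e + half)
    then "1" else "0")

-- ===== PRECONDITION & SPEC =====
-- A evaluates expected_freqs[1] - expected_freqs[0] first, so it raises IndexError
-- whenever expected_freqs has fewer than two elements; exactly those inputs are excluded.
def Pre_frequencies_to_bits (frequencies : List Int) (expected_freqs : List Int) : Prop :=
  2 ≤ expected_freqs.length
instance (frequencies : List Int) (expected_freqs : List Int) : Decidable (Pre_frequencies_to_bits frequencies expected_freqs) := by unfold Pre_frequencies_to_bits; infer_instance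

def pvWitness_frequencies_to_bits : List Int × List Int := ([440, 930], [400, 600, 800, 1000])

def Spec_frequencies_to_bits (frequencies : List Int) (expected_freqs : List Int) (out : List String) : Prop := out = frequencies_to_bits_alt frequencies expected_freqs
instance (frequencies : List Int) (expected_freqs : List Int) (out : List String) : Decidable (Spec_frequencies_to_bits frequencies expected_freqs out) := by unfold Spec_frequencies_to_bits; infer_instance

-- ===== CLAIM (what is proved, stated in full; the proofs are below) =====
def Claim_equal_frequencies_to_bits : Prop := ∀ (frequencies : List Int) (expected_freqs : List Int), Dom_frequencies_to_bits frequencies expected_freqs → Pre_frequencies_to_bits frequencies expected_freqs → Spec_frequencies_to_bits frequencies expected_freqs (frequencies_to_bits frequencies expected_freqs)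

-- ===== LEMMAS AND PROOFS =====

-- Inner loop of A (one freq against all bands): pointwise description.
theorem inner_getElem? (c : Nat → Prop) [DecidablePred c] (l : List Nat) (bl : List String) (j : Nat) :
    (l.foldl (fun bl i => if c i then bl.set i "1" else bl) bl)[j]? =
      if c j ∧ j ∈ l ∧ j < bl.length then some "1" else bl[j]? := by
  induction l generalizing bl with
  | nil => simp
  | cons i l ih =>
    simp only [List.foldl_cons]
    rw [ih]
    by_cases hci : c i
    · simp only [hci, if_true]
      rw [List.length_set]
      by_cases hij : j = i
      · subst hij
        by_cases hjl : j < bl.length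
        · simp [List.getElem?_set_self, hjl, hci]
        · simp [List.getElem?_set, hjl, hci]
      · simp only [List.getElem?_set_ne (by omega : i ≠ j)]
        by_cases hcj : c j
        · simp [hcj, List.mem_cons, hij]
        · simp [hcj]
    · simp only [hci, if_false]
      by_cases hcj : c j
      · simp only [hcj, true_and, List.mem_cons]
        have hji : j ≠ i := fun h => hci (h ▸ hcj)
        simp [hji]
      · simp [hcj]

-- Outer loop of A: pointwise description via existence of a matching frequency.
theorem outer_getElem? (c : Int → Nat → Prop) [∀ f i, Decidable (c f i)]
    (fs : List Int) (n : Nat) (bl : List String) (j : Nat) :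
    (fs.foldl (fun bl freq =>
        (List.range n).foldl (fun bl i => if c freq i then bl.set i "1" else bl) bl) bl)[j]? =
      if (∃ f ∈ fs, c f j) ∧ j ∈ List.range n ∧ j < bl.length then some "1" else bl[j]? := by
  induction fs generalizing bl with
  | nil => simp
  | cons f fs ih =>
    simp only [List.foldl_cons]
    rw [ih]
    have hlen : ((List.range n).foldl (fun bl i => if c f i then bl.set i "1" else bl) bl).length = bl.length := by
      induction (List.range n) generalizing bl with
      | nil => rfl
      | cons i l ihl => simp only [List.foldl_cons]; rw [ihl]; split <;> simp
    rw [hlen, inner_getElem? (c f)]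
    simp only [List.exists_mem_cons_iff]
    by_cases hR : j ∈ List.range n ∧ j < bl.length
    · by_cases hcf : c f j <;> by_cases hex : ∃ g ∈ fs, c g j <;>
        simp [hR.1, hR.2, hcf, hex]
    · have h1 : ¬ ((c f j ∨ ∃ g ∈ fs, c g j) ∧ j ∈ List.range n ∧ j < bl.length) := fun h => hR h.2
      have h2 : ¬ ((∃ g ∈ fs, c g j) ∧ j ∈ List.range n ∧ j < bl.length) := fun h => hR h.2
      have h3 : ¬ (c f j ∧ j ∈ List.range n ∧ j < bl.length) := fun h => hR h.2
      simp only [h1, h2, h3, if_false]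

-- Binary-search characterisation: some sorted element lies in [lo, hi) iff the two
-- insertion points differ.
theorem bisect_window (fs : List Int) (lo hi : Int)
    (hs : fs.Pairwise (fun a b => a ≤ b)) :
    (PySem.List.bisectLeft fs lo < PySem.List.bisectLeft fs hi) ↔
      ∃ f ∈ fs, lo ≤ f ∧ f < hi := by
  obtain ⟨hle_lo, hlt_lo, hge_lo⟩ := PySem.List.bisectLeft_spec fs lo hs
  obtain ⟨hle_hi, hlt_hi, hge_hi⟩ := PySem.List.bisectLeft_spec fs hi hs
  constructor
  · intro h
    have hr : PySem.List.bisectLeft fs lo < fs.length := lt_of_lt_of_le h hle_hi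
    refine ⟨fs[PySem.List.bisectLeft fs lo], List.getElem_mem hr, ?_, ?_⟩
    · exact hge_lo _ hr le_rfl
    · exact hlt_hi _ hr h
  · rintro ⟨f, hf, hlo, hhi⟩
    obtain ⟨j, hj, rfl⟩ := List.getElem_of_mem hf
    have h1 : PySem.List.bisectLeft fs lo ≤ j := by
      by_contra hc
      exact absurd (hlt_lo j hj (by omega)) (by omega)
    have h2 : j < PySem.List.bisectLeft fs hi := by
      by_contra hc
      exact absurd (hge_hi j hj (by omega)) (by omega)
    omega

-- ===== VERDICT (by name: the statement is the Claim_ definition above) =====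
theorem frequencies_to_bits_spec : Claim_equal_frequencies_to_bits := by
  intro freqs es _hdom _hpre
  unfold Spec_frequencies_to_bits frequencies_to_bits frequencies_to_bits_alt
  set pm := PySem.Int.floordiv (es.getD 1 0 - es.getD 0 0) 2 with hpm
  set c : Int → Nat → Prop := fun f i => es.getD i 0 - pm ≤ f ∧ f < es.getD i 0 + pm with hc
  set fs := PySem.List.sorted freqs (fun x => x) false with hfs
  have hsorted : fs.Pairwise (fun a b => a ≤ b) := PySem.List.sorted_pairwise freqs (fun x => x)
  apply List.ext_getElem?
  intro j
  rw [outer_getElem? c freqs es.length (List.replicate es.length "0") j]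
  by_cases hj : j < es.length
  · have hmem : j ∈ List.range es.length := List.mem_range.mpr hj
    rw [List.getElem?_map]
    simp only [List.getElem?_eq_getElem hj, Option.map_some]
    have hwin : (PySem.List.bisectLeft fs (es[j] - pm) < PySem.List.bisectLeft fs (es[j] + pm)) ↔
        ∃ f ∈ freqs, c f j := by
      rw [bisect_window fs (es[j] - pm) (es[j] + pm) hsorted]
      constructor
      · rintro ⟨f, hf, h1, h2⟩
        refine ⟨f, ((PySem.List.mem_sorted freqs (fun x => x) false f)).mp hf, ?_⟩
        simp only [hc, List.getD_eq_getElem?_getD, List.getElem?_eq_getElem hj, Option.getD_some]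
        omega
      · rintro ⟨f, hf, h1⟩
        refine ⟨f, ((PySem.List.mem_sorted freqs (fun x => x) false f)).mpr hf, ?_⟩
        simp only [hc, List.getD_eq_getElem?_getD, List.getElem?_eq_getElem hj, Option.getD_some] at h1
        omega
    by_cases hex : ∃ f ∈ freqs, c f j
    · simp only [hex, hmem, List.length_replicate, hj, and_true, true_and, if_true]
      rw [if_pos (hwin.mpr hex)]
    · simp only [hex, false_and, if_false]
      rw [if_neg (fun h => hex (hwin.mp h))]
      simp [List.getElem?_replicate, hj]
  · have h1 : j ∉ List.range es.length := by simp [hj]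
    simp only [h1, false_and, and_false, if_false]
    rw [List.getElem?_map]
    simp [List.getElem?_eq_none (by simpa using hj : es.length ≤ j), List.getElem?_replicate, hj]
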